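-- pv_equiv track=rewrite | github.com/WSm-77/WDI | set4/20.py | getRookPos
-- ===== SOURCE A (Python) =====
-- def getRookPos(tab):
--     tabLen = len(tab)
--     linearTabLen = tabLen * tabLen
--     rook1Pos = rook2Pos = None
--     maxSum = -1
--     for i in range(linearTabLen - 1):
--         for j in range(i + 1, linearTabLen):
--             R1row = i // tabLen
--             R1coll = i % tabLen
--             R2row = j // tabLen
--             R2coll = j % tabLen
--             currentSum = -2 * (tab[R1row][R1coll] + tab[R2row][R2coll])
--             if R1row == R2row:
--                 for k in range(tabLen):
--                     currentSum -= tab[R1row][k]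
--                 #end for
--             elif R1coll == R2coll:
--                 for k in range(tabLen):
--                     currentSum -= tab[k][R1coll]
--                 #end for
--             # else:
--             currentSum -= tab[R1row][R2coll] + tab[R2row][R1coll]
--             for k in range(tabLen):
--                 currentSum += tab[R1row][k] + tab[R2row][k] + tab[k][R1coll] + tab[k][R2coll]
--             #end for
--             #end if
--             if currentSum > maxSum:
--                 maxSum = currentSum
--                 rook1Pos = (R1row, R1coll)
--                 rook2Pos = (R2row, R2coll)
--             #end if
--         #end for
--     #end for
--     return (rook1Pos, rook2Pos)
-- ===== SOURCE B (Python) =====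
-- def getRookPos(tab):
--     n = len(tab)
--     rowS = [sum(tab[r][k] for k in range(n)) for r in range(n)]
--     colS = [sum(tab[k][c] for k in range(n)) for c in range(n)]
--
--     def score(p):
--         i, j = p
--         r1, c1 = divmod(i, n)
--         r2, c2 = divmod(j, n)
--         s = (rowS[r1] + rowS[r2] + colS[c1] + colS[c2]
--              - 2 * (tab[r1][c1] + tab[r2][c2])
--              - tab[r1][c2] - tab[r2][c1])
--         if r1 == r2:
--             s -= rowS[r1]
--         elif c1 == c2:
--             s -= colS[c1]
--         return s
--
--     pairs = [(i, j) for i in range(n * n) for j in range(i + 1, n * n)]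
--     if not pairs:
--         return (None, None)
--     best = max(pairs, key=score)
--     if score(best) <= -1:
--         return (None, None)
--     return (divmod(best[0], n), divmod(best[1], n))
-- ===== Notes on version B (the rewrite author's own statement) =====
-- stated objective: faster
-- what changed: B precomputes all row and column sums once, materialises the list of cell pairs, and selects the winner with max(pairs, key=score) (first maximum, matching A's strict-improvement rule) with an O(1) score per pair instead of A's three O(n) scans inside the nested argmax loop; a final > -1 threshold reproduces A's initial maxSum.
-- outside the precondition, e.g. on getRookPos([[]]): A returns (None, None), B raises IndexError
import Mathlib
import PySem

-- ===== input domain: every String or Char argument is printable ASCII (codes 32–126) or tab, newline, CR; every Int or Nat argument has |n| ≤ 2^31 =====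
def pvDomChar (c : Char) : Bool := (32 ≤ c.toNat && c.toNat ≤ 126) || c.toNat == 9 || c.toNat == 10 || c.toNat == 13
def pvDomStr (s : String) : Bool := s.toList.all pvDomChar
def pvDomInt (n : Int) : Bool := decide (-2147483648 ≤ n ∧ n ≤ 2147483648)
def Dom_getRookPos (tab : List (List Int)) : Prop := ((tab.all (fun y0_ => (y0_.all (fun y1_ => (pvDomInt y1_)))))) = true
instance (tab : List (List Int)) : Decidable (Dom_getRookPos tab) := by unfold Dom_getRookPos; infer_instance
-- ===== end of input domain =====

-- B precomputes row/column sums, lists all cell pairs once and picks the best with max(key=score)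
-- (first maximum, like A's strict-improvement loop), scoring each pair in O(1) instead of O(n).

-- tab[r][c] with Python's O(1) list indexing (both ports convert tab to an array once at entry);
-- exact for the nonnegative in-range indices both programs use (row/col numbers below tab.length, under Pre_)
def pvCell (t : Array (Array Int)) (r c : Int) : Int :=
  ((t[r.toNat]?).getD #[])[c.toNat]?.getD 0

-- ===== PORT A =====
-- score of the pair (i, j) exactly as A computes it: three O(n) scans over range(tabLen)
-- (rng is list(range(tabLen)) — the same value every iteration, so it is computed once in getRookPos)
def pvScoreA (t : Array (Array Int)) (n : Int) (rng : List Int) (i j : Int) : Int :=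
  let r1 := PySem.Int.floordiv i n
  let c1 := PySem.Int.mod i n
  let r2 := PySem.Int.floordiv j n
  let c2 := PySem.Int.mod j n
  let s0 := -2 * (pvCell t r1 c1 + pvCell t r2 c2)
  let s1 :=
    if r1 = r2 then
      rng.foldl (fun s k => s - pvCell t r1 k) s0
    else if c1 = c2 then
      rng.foldl (fun s k => s - pvCell t k c1) s0
    else s0
  let s2 := s1 - (pvCell t r1 c2 + pvCell t r2 c1)
  rng.foldl
      (fun s k => s + (pvCell t r1 k + pvCell t r2 k + pvCell t k c1 + pvCell t k c2)) s2

-- body of A's inner loop: strict-improvement argmax update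
def pvStepA (t : Array (Array Int)) (n : Int) (rng : List Int)
    (st : Int × Option (Int × Int) × Option (Int × Int)) (i j : Int) :
    Int × Option (Int × Int) × Option (Int × Int) :=
  if pvScoreA t n rng i j > st.1 then
    (pvScoreA t n rng i j,
      some (PySem.Int.floordiv i n, PySem.Int.mod i n),
      some (PySem.Int.floordiv j n, PySem.Int.mod j n))
  else st

def getRookPos (tab : List (List Int)) : (Option (Int × Int)) × (Option (Int × Int)) :=
  let n : Int := (tab.length : Int)
  let ln : Int := n * n
  let t : Array (Array Int) := (tab.map List.toArray).toArray
  let rng := PySem.List.pyRange 0 n 1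
  ((PySem.List.pyRange 0 (ln - 1) 1).foldl
    (fun st i => (PySem.List.pyRange (i + 1) ln 1).foldl (fun st j => pvStepA t n rng st i j) st)
    ((-1 : Int), ((none : Option (Int × Int)), (none : Option (Int × Int))))).2

-- ===== PORT B =====
-- score(p): the pair's score in O(1) from the precomputed row/column sums
def pvScoreB (t : Array (Array Int)) (n : Int) (rowS colS : List Int) (p : Int × Int) : Int :=
  let r1 := PySem.Int.floordiv p.1 n
  let c1 := PySem.Int.mod p.1 n
  let r2 := PySem.Int.floordiv p.2 n
  let c2 := PySem.Int.mod p.2 n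
  let s0 := PySem.List.pyGetD rowS r1 0 + PySem.List.pyGetD rowS r2 0
            + PySem.List.pyGetD colS c1 0 + PySem.List.pyGetD colS c2 0
            - 2 * (pvCell t r1 c1 + pvCell t r2 c2)
            - pvCell t r1 c2 - pvCell t r2 c1
  if r1 = r2 then s0 - PySem.List.pyGetD rowS r1 0
  else if c1 = c2 then s0 - PySem.List.pyGetD colS c1 0
  else s0

def getRookPos_alt (tab : List (List Int)) : (Option (Int × Int)) × (Option (Int × Int)) :=
  let n : Int := (tab.length : Int)
  let t : Array (Array Int) := (tab.map List.toArray).toArray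
  let rowS := (PySem.List.pyRange 0 n 1).map
      (fun r => ((PySem.List.pyRange 0 n 1).map (fun k => pvCell t r k)).sum)
  let colS := (PySem.List.pyRange 0 n 1).map
      (fun c => ((PySem.List.pyRange 0 n 1).map (fun k => pvCell t k c)).sum)
  let pairs := (PySem.List.pyRange 0 (n * n) 1).flatMap
      (fun i => (PySem.List.pyRange (i + 1) (n * n) 1).map (fun j => (i, j)))
  match PySem.List.max? pairs (pvScoreB t n rowS colS) with
  | none => (none, none)                    -- "if not pairs: return (None, None)"
  | some best =>
    if pvScoreB t n rowS colS best ≤ -1 then (none, none)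
    else (some (PySem.Int.floordiv best.1 n, PySem.Int.mod best.1 n),
          some (PySem.Int.floordiv best.2 n, PySem.Int.mod best.2 n))

-- ===== PRECONDITION & SPEC =====
-- Pre_ requires every row to be at least as long as the board height: A indexes a square
-- tab.length × tab.length prefix and raises IndexError on a shorter row (for tab.length ≥ 2);
-- it also excludes boards like [[]] where A returns (None, None) only because its pair loops
-- never run, while B's row-sum precomputation indexes the rows and raises IndexError there.
def Pre_getRookPos (tab : List (List Int)) : Prop :=
  ∀ row ∈ tab, tab.length ≤ row.length
instance (tab : List (List Int)) : Decidable (Pre_getRookPos tab) := by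
  unfold Pre_getRookPos; infer_instance

def pvWitness_getRookPos : List (List Int) := [[1, 2], [3, 4]]

def Spec_getRookPos (tab : List (List Int)) (out : (Option (Int × Int)) × (Option (Int × Int))) : Prop := out = getRookPos_alt tab
instance (tab : List (List Int)) (out : (Option (Int × Int)) × (Option (Int × Int))) : Decidable (Spec_getRookPos tab out) := by unfold Spec_getRookPos; infer_instance

-- ===== CLAIM (what is proved, stated in full; the proofs are below) =====
def Claim_equal_getRookPos : Prop := ∀ (tab : List (List Int)), Dom_getRookPos tab → Pre_getRookPos tab → Spec_getRookPos tab (getRookPos tab)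

-- ===== LEMMAS AND PROOFS =====

-- a 'currentSum -= f(k)' loop is subtraction of the sum
lemma pv_foldl_sub {β : Type} (l : List β) (f : β → Int) (s : Int) :
    l.foldl (fun a k => a - f k) s = s - (l.map f).sum := by
  induction l generalizing s with
  | nil => simp
  | cons x xs ih => simp [ih]; ring

-- A's three scans compute, pair by pair, exactly B's O(1) score
lemma pv_score_eq (t : Array (Array Int)) (n i j : Int)
    (hn : 0 ≤ n) (hi0 : 0 ≤ i) (hi1 : i < n * n) (hj0 : 0 ≤ j) (hj1 : j < n * n) :
    pvScoreA t n (PySem.List.pyRange 0 n 1) i j =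
    pvScoreB t n
      ((PySem.List.pyRange 0 n 1).map
        (fun r => ((PySem.List.pyRange 0 n 1).map (fun k => pvCell t r k)).sum))
      ((PySem.List.pyRange 0 n 1).map
        (fun c => ((PySem.List.pyRange 0 n 1).map (fun k => pvCell t k c)).sum))
      (i, j) := by
  have hnpos : 0 < n := by
    rcases lt_or_eq_of_le hn with h | h
    · exact h
    · exfalso; rw [← h] at hi1; simp at hi1; omega
  have hdiv : ∀ x : Int, 0 ≤ x → x < n * n →
      0 ≤ PySem.Int.floordiv x n ∧ PySem.Int.floordiv x n < n := by
    intro x hx0 hx1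
    refine ⟨?_, ?_⟩
    · rw [PySem.Int.floordiv_eq_ediv_of_pos hnpos]
      exact Int.ediv_nonneg hx0 (le_of_lt hnpos)
    · rw [PySem.Int.floordiv_lt_iff_lt_mul hnpos]; exact hx1
  have hr1 := hdiv i hi0 hi1
  have hr2 := hdiv j hj0 hj1
  have hc1 : 0 ≤ PySem.Int.mod i n ∧ PySem.Int.mod i n < n :=
    ⟨PySem.Int.mod_nonneg i hnpos, PySem.Int.mod_lt i hnpos⟩
  have hc2 : 0 ≤ PySem.Int.mod j n ∧ PySem.Int.mod j n < n :=
    ⟨PySem.Int.mod_nonneg j hnpos, PySem.Int.mod_lt j hnpos⟩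
  simp only [pvScoreA, pvScoreB]
  rw [PySem.List.pyGetD_map_pyRange_of_nonneg _ _ _ _ hr1.1 hr1.2,
      PySem.List.pyGetD_map_pyRange_of_nonneg _ _ _ _ hr2.1 hr2.2,
      PySem.List.pyGetD_map_pyRange_of_nonneg _ _ _ _ hc1.1 hc1.2,
      PySem.List.pyGetD_map_pyRange_of_nonneg _ _ _ _ hc2.1 hc2.2]
  simp only [pv_foldl_sub, PySem.List.foldl_add, PySem.List.sum_map_add_int]
  split_ifs <;> ring

-- max? on a cons is the plain first-extremal fold
lemma pv_max?_cons {α : Type} (f : α → Int) (h : α) (t : List α) :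
    PySem.List.max? (h :: t) f =
      some (t.foldl (fun m x => if f m < f x then x else m) h) := by
  show List.foldl _ (some h) t = _
  induction t generalizing h with
  | nil => rfl
  | cons y t ih =>
    simp only [List.foldl]
    split_ifs <;> exact ih _

-- A's strict-improvement update over a list, started below the first score or not,
-- lands on the FIRST maximal element — the element max? picks
lemma pv_argmax_aux {α β : Type} (f : α → Int) (g : α → β) :
    ∀ (t : List α) (h : α) (m0 : Int) (p0 : β),
    t.foldl (fun st x => if f x > st.1 then (f x, g x) else st)
      (if f h > m0 then (f h, g h) else (m0, p0))
    = (fun x => if f x > m0 then (f x, g x) else (m0, p0))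
        (t.foldl (fun m x => if f m < f x then x else m) h) := by
  intro t
  induction t with
  | nil => intro h m0 p0; rfl
  | cons y t ih =>
    intro h m0 p0
    simp only [List.foldl]
    by_cases hy : f h < f y
    · rw [if_pos hy]
      have key : (if f y > (if f h > m0 then (f h, g h) else (m0, p0)).1 then (f y, g y)
          else if f h > m0 then (f h, g h) else (m0, p0))
          = if f y > m0 then (f y, g y) else (m0, p0) := by
        split_ifs <;> first | rfl | (exfalso; simp_all; omega)
      rw [key]
      simpa using ih y m0 p0
    · rw [if_neg hy]
      have key : (if f y > (if f h > m0 then (f h, g h) else (m0, p0)).1 then (f y, g y)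
          else if f h > m0 then (f h, g h) else (m0, p0))
          = if f h > m0 then (f h, g h) else (m0, p0) := by
        split_ifs <;> first | rfl | (exfalso; simp_all; omega)
      rw [key]
      simpa using ih h m0 p0

lemma pv_argmax_foldl {α β : Type} (f : α → Int) (g : α → β)
    (l : List α) (m0 : Int) (p0 : β) :
    l.foldl (fun st x => if f x > st.1 then (f x, g x) else st) (m0, p0)
    = match PySem.List.max? l f with
      | none => (m0, p0)
      | some x => if f x > m0 then (f x, g x) else (m0, p0) := by
  cases l with
  | nil => rfl
  | cons h t =>
    rw [pv_max?_cons]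
    have := pv_argmax_aux f g t h m0 p0
    simpa [List.foldl] using this

-- ===== VERDICT (by name: the statement is the Claim_ definition above) =====
theorem getRookPos_spec : Claim_equal_getRookPos := by
  intro tab _ _
  unfold Spec_getRookPos
  simp only [getRookPos, getRookPos_alt]
  set n : Int := (tab.length : Int) with hn
  set t : Array (Array Int) := (tab.map List.toArray).toArray with ht
  set rowS := (PySem.List.pyRange 0 n 1).map
      (fun r => ((PySem.List.pyRange 0 n 1).map (fun k => pvCell t r k)).sum) with hrow
  set colS := (PySem.List.pyRange 0 n 1).map
      (fun c => ((PySem.List.pyRange 0 n 1).map (fun k => pvCell t k c)).sum) with hcol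
  set f := pvScoreB t n rowS colS with hf
  set g : Int × Int → (Option (Int × Int)) × (Option (Int × Int)) :=
      fun p => (some (PySem.Int.floordiv p.1 n, PySem.Int.mod p.1 n),
                some (PySem.Int.floordiv p.2 n, PySem.Int.mod p.2 n)) with hg
  have hn0 : (0 : Int) ≤ n := by simp [hn]
  -- step 1: A's nested fold with its scanning score = the same fold with B's O(1) score
  have h1 : (PySem.List.pyRange 0 (n * n - 1) 1).foldl
      (fun st i => (PySem.List.pyRange (i + 1) (n * n) 1).foldl
        (fun st j => pvStepA t n (PySem.List.pyRange 0 n 1) st i j) st)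
      ((-1 : Int), ((none : Option (Int × Int)), (none : Option (Int × Int))))
      = (PySem.List.pyRange 0 (n * n - 1) 1).foldl
      (fun st i => (PySem.List.pyRange (i + 1) (n * n) 1).foldl
        (fun st j => if f (i, j) > st.1 then (f (i, j), g (i, j)) else st) st)
      ((-1 : Int), ((none : Option (Int × Int)), (none : Option (Int × Int)))) := by
    apply PySem.List.foldl_congr_mem
    intro st i hi
    rw [PySem.List.mem_pyRange_one] at hi
    apply PySem.List.foldl_congr_mem
    intro st' j hj
    rw [PySem.List.mem_pyRange_one] at hj
    simp only [pvStepA, hf, hg]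
    rw [pv_score_eq t n i j hn0 hi.1 (by omega) (by omega) hj.2, ← hrow, ← hcol]
  rw [h1]
  -- step 2: flatten the nested fold into a fold over B's pairs list
  have h2 : ∀ (init : Int × (Option (Int × Int)) × (Option (Int × Int))),
      (PySem.List.pyRange 0 (n * n - 1) 1).foldl
        (fun st i => (PySem.List.pyRange (i + 1) (n * n) 1).foldl
          (fun st j => if f (i, j) > st.1 then (f (i, j), g (i, j)) else st) st) init
      = ((PySem.List.pyRange 0 (n * n) 1).flatMap
          (fun i => (PySem.List.pyRange (i + 1) (n * n) 1).map (fun j => (i, j)))).foldl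
          (fun st p => if f p > st.1 then (f p, g p) else st) init := by
    intro init
    rw [List.foldl_flatMap]
    by_cases hnn : (1 : Int) ≤ n * n
    · rw [PySem.List.pyRange_one_append 0 (n * n - 1) (n * n) (by omega) (by omega)]
      rw [List.foldl_append]
      have hlast : PySem.List.pyRange (n * n - 1) (n * n) 1 = [n * n - 1] := by
        rw [PySem.List.pyRange_one_cons (by omega)]
        simp [PySem.List.pyRange]
      rw [hlast]
      simp only [List.foldl_cons, List.foldl_nil, List.foldl_map]
      have he : PySem.List.pyRange (n * n - 1 + 1) (n * n) 1 = [] := by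
        simp [PySem.List.pyRange]
      rw [he]
      simp
    · have e1 : PySem.List.pyRange 0 (n * n - 1) 1 = [] := by
        simp [PySem.List.pyRange]; omega
      have e2 : PySem.List.pyRange 0 (n * n) 1 = [] := by
        simp [PySem.List.pyRange]; omega
      rw [e1, e2]; rfl
  rw [h2]
  -- step 3: the strict-improvement fold over the pairs list is max? + threshold
  rw [pv_argmax_foldl f g _ (-1)
      (((none : Option (Int × Int)), (none : Option (Int × Int))))]
  cases hmax : PySem.List.max?
      ((PySem.List.pyRange 0 (n * n) 1).flatMap
        (fun i => (PySem.List.pyRange (i + 1) (n * n) 1).map (fun j => (i, j)))) f with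
  | none => rfl
  | some best =>
    by_cases hb : f best ≤ -1
    · simp [hb, show ¬ f best > -1 by omega]
    · simp [hb, show f best > -1 by omega, hg]
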